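-- pv_equiv track=rewrite | github.com/RasmusAaen/AdventOfCode | 2021/day20.py | part1
-- ===== SOURCE A (Python) =====
-- import collections
-- from copy import deepcopy
--
-- def parseInput(values: list[str]):
--     alg = list(map(lambda x: 0 if x == '.' else 1, values[0].strip()))
--
--     img = collections.defaultdict(int)
--     for r in range(2,len(values)):
--         for c in range(len(values[r])):
--             img[r-2,c] = 0 if values[r][c] == '.' else 1
--
--     return alg, img
--
-- def part1(values: list, rounds: int = 2) -> int:
--     alg, img = parseInput(values)
--
--     for enh in range(rounds):
--         minR = min(map(lambda x: x[0], img.keys()))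
--         minC = min(map(lambda x: x[1], img.keys()))
--         maxR = max(map(lambda x: x[0], img.keys()))
--         maxC = max(map(lambda x: x[1], img.keys()))
--
--         out = collections.defaultdict(lambda: 1 if alg[0] == 1 and enh % 2 == 1 else 0)
--
--         for r in range(minR-1, maxR+2):
--             for c in range(minC-1, maxC+2):
--                 n = ''
--                 for dr, dc in ((-1,-1),(-1,0),(-1,1),(0,-1),(0,0),(0,1),(1,-1),(1, 0),(1,1)):
--                     n += str(img[r + dr,c + dc])
--                 out[r,c] = alg[int(n, 2)]
--         img = deepcopy(out)
--
--     return list(img.values()).count(1)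
-- ===== SOURCE B (Python) =====
-- def _trips(row, bg, w):
--     e = [bg, bg] + row + [bg, bg]
--     return [4 * e[c] + 2 * e[c + 1] + e[c + 2] for c in range(w + 2)]
--
--
-- def part1(values: list, rounds: int = 2) -> int:
--     # Separable two-stage enhancement: a horizontal pass turns each row into
--     # 3-bit column triples, a vertical pass combines three triple-rows
--     # arithmetically into the algorithm index; rectangular grid + tracked
--     # background replace A's coordinate dict with per-round min/max rescans.
--     alg = [0 if ch == '.' else 1 for ch in values[0].strip()]
--     raw = [[0 if ch == '.' else 1 for ch in s] for s in values[2:]]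
--     while raw and not raw[0]:
--         raw.pop(0)
--     while raw and not raw[-1]:
--         raw.pop()
--     width = max((len(r) for r in raw), default=0)
--     grid = [r + [0] * (width - len(r)) for r in raw]
--     for enh in range(rounds):
--         bg = 1 if alg[0] == 1 and enh % 2 == 1 else 0
--         h, w = len(grid), len(grid[0])
--         bgrow = [7 * bg] * (w + 2)
--         trips = [bgrow, bgrow] + [_trips(row, bg, w) for row in grid] + [bgrow, bgrow]
--         grid = [[alg[64 * a + 8 * b + c]
--                  for a, b, c in zip(trips[i], trips[i + 1], trips[i + 2])]
--                 for i in range(h + 2)]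
--     return sum(map(sum, grid))
-- ===== Notes on version B (the rewrite author's own statement) =====
-- stated objective: alternative
-- what changed: Replaces the coordinate-keyed defaultdict with per-round min/max key rescans and per-cell 9-neighbour binary-string building by a separable two-stage pass on a rectangular list grid with a tracked background: a horizontal pass precomputes 3-bit column-triple rows, then a vertical pass combines three triple-rows arithmetically (64*a+8*b+c) into each algorithm index; the answer is the sum of the final grid.
import Mathlib
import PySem

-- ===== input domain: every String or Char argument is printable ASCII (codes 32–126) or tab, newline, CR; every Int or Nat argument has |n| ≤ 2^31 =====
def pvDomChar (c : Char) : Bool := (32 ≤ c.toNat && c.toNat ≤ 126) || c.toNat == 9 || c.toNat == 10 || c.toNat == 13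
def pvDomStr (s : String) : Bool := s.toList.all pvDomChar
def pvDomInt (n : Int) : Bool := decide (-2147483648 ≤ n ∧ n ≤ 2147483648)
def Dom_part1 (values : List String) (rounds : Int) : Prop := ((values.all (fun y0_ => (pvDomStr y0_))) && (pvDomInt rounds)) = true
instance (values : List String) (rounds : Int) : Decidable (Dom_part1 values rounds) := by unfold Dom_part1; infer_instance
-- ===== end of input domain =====

-- B replaces A's coordinate dict (with per-round min/max key rescans and 9-neighbour
-- binary-string indices) by a separable two-stage pass on a rectangular grid with a
-- tracked background: a horizontal pass of 3-bit column triples, then a vertical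
-- arithmetic combine; objective: alternative algorithmic decomposition, same values.

-- ===== PORT A =====
-- '.' ↦ 0, anything else ↦ 1  (the lambda in parseInput)
def pvCellA (ch : Char) : Int := if ch = '.' then 0 else 1

-- parseInput's alg; values[0] raises IndexError on values = [] (excluded by Pre_), ported as getD
def pvAlgA (values : List String) : List Int :=
  (PySem.Chars.strip ((PySem.List.pyGetD values 0 "").toList)).map pvCellA

-- parseInput's img: defaultdict(int) filled row by row
def pvImgA (values : List String) : PySem.Dict (Int × Int) Int :=
  (PySem.List.pyRange 2 (PySem.List.len values) 1).foldl (fun d r =>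
    (PySem.List.pyRange 0 (PySem.Str.len (PySem.List.pyGetD values r "")) 1).foldl (fun d c =>
      d.insert (r - 2, c) (pvCellA (PySem.List.pyGetD (PySem.List.pyGetD values r "").toList c ' '))) d)
    PySem.Dict.empty

-- the nine (dr, dc) offsets, in A's order
def pvOffsA : List (Int × Int) := [(-1,-1),(-1,0),(-1,1),(0,-1),(0,0),(0,1),(1,-1),(1,0),(1,1)]

-- one round of A.  min()/max() raise ValueError on an empty dict (excluded by Pre_), ported as
-- .getD 0.  The reads img[r+dr, c+dc] hit a defaultdict whose factory is the PREVIOUS round's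
-- lambda `1 if alg[0] == 1 and enh % 2 == 1 else 0`; that lambda closes over the loop VARIABLE
-- enh, so when it fires it sees the current round's enh (and at enh = 0 the factory is int,
-- which the same formula also yields).  alg[0] inside it is ported as getD (alg = [] is
-- excluded by Pre_ whenever a round runs).  defaultdict's insert-on-missing-read is
-- unobservable here (img is replaced at the end of the round before its keys are read again),
-- so the reads are ported as getD with that default.
def pvRoundA (alg : List Int) (enh : Int) (img : PySem.Dict (Int × Int) Int) :
    PySem.Dict (Int × Int) Int :=
  let minR := (PySem.List.min? (img.keys.map Prod.fst) (fun x => x)).getD 0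
  let minC := (PySem.List.min? (img.keys.map Prod.snd) (fun x => x)).getD 0
  let maxR := (PySem.List.max? (img.keys.map Prod.fst) (fun x => x)).getD 0
  let maxC := (PySem.List.max? (img.keys.map Prod.snd) (fun x => x)).getD 0
  let dflt : Int := if PySem.List.pyGetD alg 0 0 = 1 ∧ PySem.Int.mod enh 2 = 1 then 1 else 0
  (PySem.List.pyRange (minR - 1) (maxR + 2) 1).foldl (fun out r =>
    (PySem.List.pyRange (minC - 1) (maxC + 2) 1).foldl (fun out c =>
      let n : List Char := pvOffsA.foldl (fun n dd =>
        n ++ PySem.Int.toChars (img.getD (r + dd.1, c + dd.2) dflt)) []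
      -- int(n, 2): n is built from str(0)/str(1) only, so int() cannot raise; ported as getD 0
      out.insert (r, c) (PySem.List.pyGetD alg ((PySem.Int.ofCharsBase? n 2).getD 0) 0)) out)
    PySem.Dict.empty

def part1 (values : List String) (rounds : Int) : Int :=
  let alg := pvAlgA values
  let img := (PySem.List.pyRange 0 rounds 1).foldl (fun img enh => pvRoundA alg enh img)
    (pvImgA values)
  ((img.values.count 1 : Nat) : Int)

-- ===== PORT B =====
def pvCellB (ch : Char) : Int := if ch = '.' then 0 else 1

-- the two while loops dropping empty rows at either end
def pvTrimB (rows : List (List Int)) : List (List Int) :=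
  ((rows.dropWhile List.isEmpty).reverse.dropWhile List.isEmpty).reverse

-- Source B's _trips helper: the 3-bit horizontal windows of one bg-padded row
def pvTripRow (row : List Int) (bg : Int) (w : Nat) : List Int :=
  let e := [bg, bg] ++ row ++ [bg, bg]
  (List.range (w + 2)).map (fun (c : Nat) =>
    4 * PySem.List.pyGetD e ((c : Nat) : Int) 0 + 2 * PySem.List.pyGetD e (((c : Nat) : Int) + 1) 0
      + PySem.List.pyGetD e (((c : Nat) : Int) + 2) 0)

-- trips = [bgrow, bgrow] + [_trips(row, bg, w) for row in grid] + [bgrow, bgrow]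
def pvTripsL (grid : List (List Int)) (bg : Int) (w : Nat) : List (List Int) :=
  [List.replicate (w + 2) (7 * bg), List.replicate (w + 2) (7 * bg)]
    ++ grid.map (fun row => pvTripRow row bg w)
    ++ [List.replicate (w + 2) (7 * bg), List.replicate (w + 2) (7 * bg)]

-- one round of B; grid[0] raises IndexError on an empty grid (excluded by Pre_), ported as getD
def pvRoundB (alg : List Int) (enh : Int) (grid : List (List Int)) : List (List Int) :=
  let bg : Int := if PySem.List.pyGetD alg 0 0 = 1 ∧ PySem.Int.mod enh 2 = 1 then 1 else 0
  let h : Nat := grid.length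
  let w : Nat := (PySem.List.pyGetD grid 0 []).length
  let trips := pvTripsL grid bg w
  (List.range (h + 2)).map (fun i =>
    ((trips.getD i []).zip ((trips.getD (i + 1) []).zip (trips.getD (i + 2) []))).map
      (fun p => PySem.List.pyGetD alg (64 * p.1 + 8 * p.2.1 + p.2.2) 0))

def part1_alt (values : List String) (rounds : Int) : Int :=
  let alg := (PySem.Chars.strip ((PySem.List.pyGetD values 0 "").toList)).map pvCellB
  let rows := (PySem.List.slice values (some 2) none).map (fun s => s.toList.map pvCellB)
  let rows := pvTrimB rows
  let width := PySem.List.maxD (rows.map (fun r => PySem.List.len r)) (fun x => x) 0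
  let grid := rows.map (fun r => r ++ List.replicate (width - PySem.List.len r).toNat 0)
  let grid := (PySem.List.pyRange 0 rounds 1).foldl (fun g enh => pvRoundB alg enh g) grid
  (grid.map List.sum).sum

-- ===== PRECONDITION & SPEC =====
-- Pre_ excludes exactly the inputs where A raises: values = [] (IndexError at values[0]);
-- and, when a round runs, an image with no cell (ValueError: min() of empty) or an algorithm
-- line too short for the alg[...] reads.  Which indices alg[...] sees depends on the
-- enhancement dynamics, which no closed-form condition can state, so short lines are
-- over-approximated: a 512-entry line is always safe, and a shorter nonempty line is kept
-- only in the statically safe all-dark-image cases (alg[0] = 0, or a single round), where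
-- every index is 0; remaining short-line inputs on which A happens to return are excluded
-- (see cites).
def Pre_part1 (values : List String) (rounds : Int) : Prop :=
  values ≠ [] ∧ (rounds ≤ 0 ∨
    ((∃ s ∈ values.drop 2, s ≠ "") ∧
     (512 ≤ (PySem.Chars.strip ((PySem.List.pyGetD values 0 "").toList)).length ∨
      (1 ≤ (PySem.Chars.strip ((PySem.List.pyGetD values 0 "").toList)).length ∧
       (∀ s ∈ values.drop 2, ∀ c ∈ s.toList, c = '.') ∧
       ((PySem.Chars.strip ((PySem.List.pyGetD values 0 "").toList)).headD '.' = '.' ∨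
        rounds ≤ 1)))))
instance (values : List String) (rounds : Int) : Decidable (Pre_part1 values rounds) := by
  unfold Pre_part1; infer_instance

def pvWitness_part1 : List String × Int := (["#.", "", "#"], 0)

def Spec_part1 (values : List String) (rounds : Int) (out : Int) : Prop := out = part1_alt values rounds
instance (values : List String) (rounds : Int) (out : Int) : Decidable (Spec_part1 values rounds out) := by unfold Spec_part1; infer_instance

-- ===== CLAIM (what is proved, stated in full; the proofs are below) =====
def Claim_equal_part1 : Prop := ∀ (values : List String) (rounds : Int), Dom_part1 values rounds → Pre_part1 values rounds → Spec_part1 values rounds (part1 values rounds)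


-- ===== LEMMAS AND PROOFS =====

-- binary digits as Bools
def pvBitC (b : Bool) : Char := if b then '1' else '0'
def pvBitV (b : Bool) : Int := if b then 1 else 0

theorem pvToChars_bit (b : Bool) : PySem.Int.toChars (pvBitV b) = [pvBitC b] := by
  cases b <;> rfl

set_option maxHeartbeats 1000000 in
theorem pvBin9 (b1 b2 b3 b4 b5 b6 b7 b8 b9 : Bool) :
    PySem.Int.ofCharsBase? [pvBitC b1, pvBitC b2, pvBitC b3, pvBitC b4, pvBitC b5, pvBitC b6,
      pvBitC b7, pvBitC b8, pvBitC b9] 2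
    = some ((((((((pvBitV b1 * 2 + pvBitV b2) * 2 + pvBitV b3) * 2 + pvBitV b4) * 2 + pvBitV b5) * 2
        + pvBitV b6) * 2 + pvBitV b7) * 2 + pvBitV b8) * 2 + pvBitV b9) := by
  revert b1 b2 b3 b4 b5 b6 b7 b8 b9; decide

theorem pvMin_getD_eq {xs : List Int} {a : Int} (ha : a ∈ xs) (hall : ∀ x ∈ xs, a ≤ x) :
    (PySem.List.min? xs (fun x => x)).getD 0 = a := by
  cases h : PySem.List.min? xs (fun x => x) with
  | none => rw [PySem.List.min?_eq_none_iff] at h; subst h; cases ha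
  | some m =>
    have hm := PySem.List.min?_mem h
    have h1 := PySem.List.min?_isMin h a ha
    have h2 := hall m hm
    simpa using le_antisymm h1 h2

theorem pvMax_getD_eq {xs : List Int} {a : Int} (ha : a ∈ xs) (hall : ∀ x ∈ xs, x ≤ a) :
    (PySem.List.max? xs (fun x => x)).getD 0 = a := by
  cases h : PySem.List.max? xs (fun x => x) with
  | none => rw [PySem.List.max?_eq_none_iff] at h; subst h; cases ha
  | some m =>
    have hm := PySem.List.max?_mem h
    have h1 := PySem.List.max?_isMax h a ha
    have h2 := hall m hm
    simpa using le_antisymm h2 h1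

theorem pvCount_one_eq_sum (l : List Int) (h : ∀ v ∈ l, v = 0 ∨ v = 1) :
    ((List.count 1 l : Nat) : Int) = l.sum := by
  induction l with
  | nil => simp
  | cons x t ih =>
    have ht := ih (fun v hv => h v (by simp [hv]))
    rcases h x (by simp) with rfl | rfl
    · simp [ht.symm]
    · simp [ht.symm]
      omega

-- a nested insert loop over distinct keys appends its row-major items
theorem pvItems_nested (key : Int → Int) (cols : Int → List Int) (f : Int → Int → Int)
    (hcols : ∀ r, (cols r).Nodup) :
    ∀ (l : List Int) (d0 : PySem.Dict (Int × Int) Int), (l.map key).Nodup →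
      (∀ r ∈ l, ∀ c, d0.contains (key r, c) = false) →
      (l.foldl (fun D r => (cols r).foldl (fun D c => D.insert (key r, c) (f r c)) D) d0).items
        = d0.items ++ l.flatMap (fun r => (cols r).map (fun c => ((key r, c), f r c))) := by
  intro l
  induction l with
  | nil => intro d0 _ _; simp
  | cons r rest ih =>
    intro d0 hkey hfresh
    simp only [List.map_cons, List.nodup_cons] at hkey
    simp only [List.foldl_cons, List.flatMap_cons]
    have hinner := PySem.Dict.items_foldl_insert_fresh (cols r) (fun c => ((key r, c) : Int × Int))
      (fun c => f r c) d0 (fun c _ => hfresh r (by simp) c)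
      ((hcols r).map (fun hab => by simpa using hab))
    set d1 := (cols r).foldl (fun D c => D.insert (key r, c) (f r c)) d0 with hd1
    have hkeys1 : d1.keys = d0.keys ++ (cols r).map (fun c => ((key r, c) : Int × Int)) := by
      simp only [PySem.Dict.keys, hinner, List.map_append, List.map_map]
      rfl
    have hfresh1 : ∀ r' ∈ rest, ∀ c, d1.contains (key r', c) = false := by
      intro r' hr' c
      rw [← Bool.not_eq_true, PySem.Dict.contains_iff_mem_keys, hkeys1, List.mem_append]
      rintro (hmem | hmem)
      · have h0 := hfresh r' (by simp [hr']) c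
        rw [← Bool.not_eq_true, PySem.Dict.contains_iff_mem_keys] at h0
        exact h0 hmem
      · rcases List.mem_map.mp hmem with ⟨c', _, hc'⟩
        have hk : key r = key r' := congrArg Prod.fst hc'
        exact hkey.1 (hk ▸ List.mem_map_of_mem hr')
    rw [ih d1 hkey.2 hfresh1, hinner, List.append_assoc]

-- row-major items of a (possibly ragged) 0/1 grid anchored at (r0, c0)
def pvRM (r0 c0 : Int) (g : List (List Int)) : List ((Int × Int) × Int) :=
  (List.range g.length).flatMap (fun (i : Nat) =>
    (List.range (g.getD i []).length).map
      (fun (j : Nat) => ((r0 + (i : Int), c0 + (j : Int)), (g.getD i []).getD j 0)))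

theorem pvRM_mem_keys (r0 c0 : Int) (g : List (List Int)) (R C : Int) :
    (R, C) ∈ (pvRM r0 c0 g).map Prod.fst ↔
      ∃ i j : Nat, i < g.length ∧ j < (g.getD i []).length ∧ R = r0 + i ∧ C = c0 + j := by
  simp only [pvRM, List.map_flatMap, List.map_map, List.mem_flatMap, List.mem_map,
    List.mem_range, Function.comp, Prod.mk.injEq]
  constructor
  · rintro ⟨i, hi, j, hj, hR, hC⟩
    exact ⟨i, j, hi, hj, hR.symm, hC.symm⟩
  · rintro ⟨i, j, hi, hj, hR, hC⟩
    exact ⟨i, hi, j, hj, hR.symm, hC.symm⟩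

theorem pvRM_keys_nodup (r0 c0 : Int) (g : List (List Int)) :
    ((pvRM r0 c0 g).map Prod.fst).Nodup := by
  rw [pvRM, List.map_flatMap]
  rw [List.nodup_flatMap]
  constructor
  · intro i _
    rw [List.map_map]
    refine List.Nodup.map ?_ (List.nodup_range)
    intro a b hab
    simp only [Function.comp] at hab
    have := congrArg Prod.snd hab
    simpa using this
  · refine List.Pairwise.imp ?_ List.pairwise_lt_range
    intro i j hij x hx hy
    simp only [List.map_map, List.mem_map, Function.comp] at hx hy
    rcases hx with ⟨a, _, rfl⟩
    rcases hy with ⟨b, _, hb⟩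
    have := congrArg Prod.fst hb
    simp only at this
    omega

theorem pvRM_getD (g : List (List Int)) (r0 c0 : Int) (d : PySem.Dict (Int × Int) Int)
    (hitems : d.items = pvRM r0 c0 g) (R C d0 : Int) :
    d.getD (R, C) d0 =
      if 0 ≤ R - r0 ∧ R - r0 < (g.length : Int) ∧ 0 ≤ C - c0 ∧
          C - c0 < ((g.getD (R - r0).toNat []).length : Int)
      then (g.getD (R - r0).toNat []).getD (C - c0).toNat 0 else d0 := by
  have hnd : d.keys.Nodup := by
    rw [PySem.Dict.keys, hitems]; exact pvRM_keys_nodup r0 c0 g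
  split_ifs with h
  · refine PySem.Dict.getD_of_mem_items d ?_ hnd d0
    rw [hitems]
    simp only [pvRM, List.mem_flatMap, List.mem_map, List.mem_range]
    refine ⟨(R - r0).toNat, by omega, (C - c0).toNat, by omega, ?_⟩
    have h1 : r0 + ((R - r0).toNat : Int) = R := by omega
    have h2 : c0 + ((C - c0).toNat : Int) = C := by omega
    rw [h1, h2]
  · refine PySem.Dict.getD_of_not_contains d d0 ?_
    rw [← Bool.not_eq_true, PySem.Dict.contains_iff_mem_keys, PySem.Dict.keys, hitems]
    rw [pvRM_mem_keys]
    rintro ⟨i, j, hi, hj, h1, h2⟩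
    have h3 : (R - r0).toNat = i := by omega
    rw [h3] at h
    omega

theorem pvMap_getD_range {α : Type} (l : List α) (d : α) :
    (List.range l.length).map (fun j => l.getD j d) = l := by
  apply List.ext_getElem
  · simp
  · intro i h1 h2
    simp [List.getD, List.getElem?_eq_getElem h2]

theorem pvPyGetD_out {α : Type} (xs : List α) (i : Int) (d : α)
    (h : ¬ PySem.Raise.InRange xs.length i) : PySem.List.pyGetD xs i d = d :=
  PySem.List.pyGetD_of_none xs i d ((PySem.List.pyGet?_eq_none_iff xs i).mpr h)

theorem pvGetD_replicate0 (n k : Nat) : (List.replicate n (0 : Int)).getD k 0 = 0 := by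
  rcases lt_or_ge k n with h | h
  · exact List.getD_replicate 0 h
  · exact List.getD_eq_default _ _ (by simpa using h)

-- a pyGetD read of a 0/1 grid (with 0/[] defaults) is 0 or 1
theorem pvRead01 (g : List (List Int)) (hcells : ∀ row ∈ g, ∀ v ∈ row, v = 0 ∨ v = 1)
    (i j : Int) :
    PySem.List.pyGetD (PySem.List.pyGetD g i []) j 0 = 0 ∨
    PySem.List.pyGetD (PySem.List.pyGetD g i []) j 0 = 1 := by
  by_cases hi : PySem.Raise.InRange g.length i
  · have hrow := PySem.List.pyGetD_mem g ([] : List Int) hi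
    by_cases hj : PySem.Raise.InRange (PySem.List.pyGetD g i []).length j
    · exact hcells _ hrow _ (PySem.List.pyGetD_mem _ 0 hj)
    · left; exact pvPyGetD_out _ _ _ hj
  · have h0 : PySem.List.pyGetD g i [] = [] := pvPyGetD_out _ _ _ hi
    rw [h0]
    left
    apply pvPyGetD_out
    simp [PySem.Raise.InRange]

theorem pvRM_mem_fst (r0 c0 : Int) (g : List (List Int)) (x : Int) :
    x ∈ ((pvRM r0 c0 g).map (fun p => p.1)).map Prod.fst ↔
      ∃ i : Nat, i < g.length ∧ 0 < (g.getD i []).length ∧ x = r0 + i := by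
  simp only [pvRM, List.map_flatMap, List.map_map, List.mem_flatMap, List.mem_map,
    List.mem_range, Function.comp]
  constructor
  · rintro ⟨i, hi, j, hj, hx⟩
    exact ⟨i, hi, by omega, hx.symm⟩
  · rintro ⟨i, hi, hj, hx⟩
    exact ⟨i, hi, 0, by omega, hx.symm⟩

theorem pvRM_mem_snd (r0 c0 : Int) (g : List (List Int)) (x : Int) :
    x ∈ ((pvRM r0 c0 g).map (fun p => p.1)).map Prod.snd ↔
      ∃ i j : Nat, i < g.length ∧ j < (g.getD i []).length ∧ x = c0 + j := by
  simp only [pvRM, List.map_flatMap, List.map_map, List.mem_flatMap, List.mem_map,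
    List.mem_range, Function.comp]
  constructor
  · rintro ⟨i, hi, j, hj, hx⟩
    exact ⟨i, j, hi, hj, hx.symm⟩
  · rintro ⟨i, j, hi, hj, hx⟩
    exact ⟨i, hi, j, hj, hx.symm⟩

-- min/max of the key coordinates of a UNIFORM (every row of length W ≥ 1) grid's items
theorem pvRect_bounds (r0 c0 : Int) (g : List (List Int)) (W : Nat)
    (hH : 1 ≤ g.length) (hW : 1 ≤ W) (hrows : ∀ i < g.length, (g.getD i []).length = W) :
    (PySem.List.min? (((pvRM r0 c0 g).map (fun p => p.1)).map Prod.fst) (fun x => x)).getD 0 = r0 ∧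
    (PySem.List.min? (((pvRM r0 c0 g).map (fun p => p.1)).map Prod.snd) (fun x => x)).getD 0 = c0 ∧
    (PySem.List.max? (((pvRM r0 c0 g).map (fun p => p.1)).map Prod.fst) (fun x => x)).getD 0
      = r0 + g.length - 1 ∧
    (PySem.List.max? (((pvRM r0 c0 g).map (fun p => p.1)).map Prod.snd) (fun x => x)).getD 0
      = c0 + W - 1 := by
  refine ⟨?_, ?_, ?_, ?_⟩
  · refine pvMin_getD_eq ((pvRM_mem_fst r0 c0 g r0).mpr ⟨0, by omega, by rw [hrows 0 (by omega)]; omega, by simp⟩) ?_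
    intro x hx
    rcases (pvRM_mem_fst r0 c0 g x).mp hx with ⟨i, _, _, rfl⟩
    omega
  · refine pvMin_getD_eq ((pvRM_mem_snd r0 c0 g c0).mpr ⟨0, 0, by omega, by rw [hrows 0 (by omega)]; omega, by omega⟩) ?_
    intro x hx
    rcases (pvRM_mem_snd r0 c0 g x).mp hx with ⟨i, j, _, _, rfl⟩
    omega
  · have h1 : r0 + (g.length : Int) - 1 = r0 + ((g.length - 1 : Nat) : Int) := by omega
    rw [h1]
    refine pvMax_getD_eq ((pvRM_mem_fst r0 c0 g _).mpr ⟨g.length - 1, by omega, by rw [hrows _ (by omega)]; omega, rfl⟩) ?_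
    intro x hx
    rcases (pvRM_mem_fst r0 c0 g x).mp hx with ⟨i, hi, _, rfl⟩
    omega
  · have h1 : c0 + (W : Int) - 1 = c0 + ((W - 1 : Nat) : Int) := by omega
    rw [h1]
    refine pvMax_getD_eq ((pvRM_mem_snd r0 c0 g _).mpr ⟨0, W - 1, by omega, by rw [hrows 0 (by omega)]; omega, rfl⟩) ?_
    intro x hx
    rcases (pvRM_mem_snd r0 c0 g x).mp hx with ⟨i, j, hi, hj, rfl⟩
    have := hrows i hi
    omega

-- the values of a row-major dict are the flattened grid
theorem pvRM_values (r0 c0 : Int) (g : List (List Int)) :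
    (pvRM r0 c0 g).map (fun p => p.2) = g.flatten := by
  rw [pvRM, List.map_flatMap]
  have : ∀ i ∈ List.range g.length,
      ((List.range (g.getD i []).length).map
        (fun (j : Nat) => ((r0 + (i : Int), c0 + (j : Int)), (g.getD i []).getD j 0))).map (fun p => p.2)
      = g.getD i [] := by
    intro i _
    rw [List.map_map]
    exact pvMap_getD_range _ _
  rw [List.flatMap_def, List.map_congr_left this, pvMap_getD_range]

-- the background value both rounds use (A's closure-captured lambda / B's bg)
def pvDflt (alg : List Int) (enh : Int) : Int :=
  if PySem.List.pyGetD alg 0 0 = 1 ∧ PySem.Int.mod enh 2 = 1 then 1 else 0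

theorem pvDflt01 (alg : List Int) (enh : Int) : pvDflt alg enh = 0 ∨ pvDflt alg enh = 1 := by
  unfold pvDflt; split_ifs <;> simp

-- a bounded read of the rectangular grid with background bg outside
def pvRead (g : List (List Int)) (h w bg r c : Int) : Int :=
  if 0 ≤ r ∧ r < h ∧ 0 ≤ c ∧ c < w then PySem.List.pyGetD (PySem.List.pyGetD g r []) c 0 else bg

def pvTrip (g : List (List Int)) (h w bg r c : Int) : Int :=
  4 * pvRead g h w bg r (c + -1) + 2 * pvRead g h w bg r (c + 0) + pvRead g h w bg r (c + 1)

def pvIdxB (g : List (List Int)) (h w bg r c : Int) : Int :=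
  64 * pvTrip g h w bg (r + -1) c + 8 * pvTrip g h w bg (r + 0) c + pvTrip g h w bg (r + 1) c

theorem pvRead_eq (img : PySem.Dict (Int × Int) Int) (g : List (List Int)) (r0 c0 dflt : Int)
    (hget : ∀ R C : Int, img.getD (R, C) dflt =
      if 0 ≤ R - r0 ∧ R - r0 < (g.length : Int) ∧ 0 ≤ C - c0 ∧
          C - c0 < ((g.getD 0 []).length : Int)
      then PySem.List.pyGetD (PySem.List.pyGetD g (R - r0) []) (C - c0) 0 else dflt)
    (r c dr dc : Int) :
    img.getD (r + dr, c + dc) dflt =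
      pvRead g (g.length : Int) ((g.getD 0 []).length : Int) dflt (r - r0 + dr) (c - c0 + dc) := by
  rw [hget (r + dr) (c + dc)]
  unfold pvRead
  have e1 : r + dr - r0 = r - r0 + dr := by ring
  have e2 : c + dc - c0 = c - c0 + dc := by ring
  rw [e1, e2]

theorem pvBinFold_eq (v1 v2 v3 v4 v5 v6 v7 v8 v9 : Int)
    (h1 : v1 = 0 ∨ v1 = 1) (h2 : v2 = 0 ∨ v2 = 1) (h3 : v3 = 0 ∨ v3 = 1)
    (h4 : v4 = 0 ∨ v4 = 1) (h5 : v5 = 0 ∨ v5 = 1) (h6 : v6 = 0 ∨ v6 = 1)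
    (h7 : v7 = 0 ∨ v7 = 1) (h8 : v8 = 0 ∨ v8 = 1) (h9 : v9 = 0 ∨ v9 = 1) :
    (PySem.Int.ofCharsBase? (((((((((([] : List Char) ++ PySem.Int.toChars v1) ++
        PySem.Int.toChars v2) ++ PySem.Int.toChars v3) ++ PySem.Int.toChars v4) ++
        PySem.Int.toChars v5) ++ PySem.Int.toChars v6) ++ PySem.Int.toChars v7) ++
        PySem.Int.toChars v8) ++ PySem.Int.toChars v9) 2).getD 0
    = ((((((((0 * 2 + v1) * 2 + v2) * 2 + v3) * 2 + v4) * 2 + v5) * 2 + v6) * 2 + v7) * 2 + v8)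
        * 2 + v9 := by
  have pick : ∀ v : Int, v = 0 ∨ v = 1 → ∃ b, v = pvBitV b := by
    rintro v (rfl | rfl)
    · exact ⟨false, rfl⟩
    · exact ⟨true, rfl⟩
  obtain ⟨b1, rfl⟩ := pick v1 h1
  obtain ⟨b2, rfl⟩ := pick v2 h2
  obtain ⟨b3, rfl⟩ := pick v3 h3
  obtain ⟨b4, rfl⟩ := pick v4 h4
  obtain ⟨b5, rfl⟩ := pick v5 h5
  obtain ⟨b6, rfl⟩ := pick v6 h6
  obtain ⟨b7, rfl⟩ := pick v7 h7
  obtain ⟨b8, rfl⟩ := pick v8 h8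
  obtain ⟨b9, rfl⟩ := pick v9 h9
  simp only [pvToChars_bit, List.nil_append, List.cons_append, List.nil_append]
  rw [pvBin9]
  simp only [Option.getD_some]
  ring

-- the cell a round of A writes equals the cell a round of B writes
set_option maxHeartbeats 2000000 in
theorem pvCell_eq (alg : List Int) (img : PySem.Dict (Int × Int) Int) (g : List (List Int))
    (r0 c0 dflt : Int)
    (hget : ∀ R C : Int, img.getD (R, C) dflt =
      if 0 ≤ R - r0 ∧ R - r0 < (g.length : Int) ∧ 0 ≤ C - c0 ∧
          C - c0 < ((g.getD 0 []).length : Int)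
      then PySem.List.pyGetD (PySem.List.pyGetD g (R - r0) []) (C - c0) 0 else dflt)
    (hcells : ∀ row ∈ g, ∀ v ∈ row, v = 0 ∨ v = 1)
    (hdflt : dflt = 0 ∨ dflt = 1) (r c : Int) :
    PySem.List.pyGetD alg ((PySem.Int.ofCharsBase? (pvOffsA.foldl (fun n dd =>
        n ++ PySem.Int.toChars (img.getD (r + dd.1, c + dd.2) dflt)) ([] : List Char)) 2).getD 0) 0
    = PySem.List.pyGetD alg
        (pvIdxB g (g.length : Int) ((g.getD 0 []).length : Int) dflt (r - r0) (c - c0)) 0 := by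
  have hv : ∀ i j : Int,
      pvRead g (g.length : Int) ((g.getD 0 []).length : Int) dflt i j = 0 ∨
      pvRead g (g.length : Int) ((g.getD 0 []).length : Int) dflt i j = 1 := by
    intro i j
    unfold pvRead
    split_ifs
    · exact pvRead01 g hcells i j
    · exact hdflt
  congr 1
  simp only [pvOffsA, List.foldl_cons, List.foldl_nil]
  rw [pvRead_eq img g r0 c0 dflt hget r c (-1) (-1), pvRead_eq img g r0 c0 dflt hget r c (-1) 0,
    pvRead_eq img g r0 c0 dflt hget r c (-1) 1, pvRead_eq img g r0 c0 dflt hget r c 0 (-1),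
    pvRead_eq img g r0 c0 dflt hget r c 0 0, pvRead_eq img g r0 c0 dflt hget r c 0 1,
    pvRead_eq img g r0 c0 dflt hget r c 1 (-1), pvRead_eq img g r0 c0 dflt hget r c 1 0,
    pvRead_eq img g r0 c0 dflt hget r c 1 1]
  rw [pvBinFold_eq _ _ _ _ _ _ _ _ _ (hv _ _) (hv _ _) (hv _ _) (hv _ _) (hv _ _) (hv _ _)
    (hv _ _) (hv _ _) (hv _ _)]
  simp only [pvIdxB, pvTrip]
  ring

theorem pvAlgRead01 (alg : List Int) (halg : ∀ v ∈ alg, v = 0 ∨ v = 1) (i : Int) :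
    PySem.List.pyGetD alg i 0 = 0 ∨ PySem.List.pyGetD alg i 0 = 1 := by
  by_cases h : PySem.Raise.InRange alg.length i
  · exact halg _ (PySem.List.pyGetD_mem alg 0 h)
  · left; exact pvPyGetD_out _ _ _ h

-- the items a round of A inserts, row-major over the grown bounding box
theorem pvRoundA_items (alg : List Int) (enh : Int) (img : PySem.Dict (Int × Int) Int)
    (r0 c0 : Int) (H W : Nat)
    (hminR : (PySem.List.min? (img.keys.map Prod.fst) (fun x => x)).getD 0 = r0)
    (hminC : (PySem.List.min? (img.keys.map Prod.snd) (fun x => x)).getD 0 = c0)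
    (hmaxR : (PySem.List.max? (img.keys.map Prod.fst) (fun x => x)).getD 0 = r0 + (H : Int) - 1)
    (hmaxC : (PySem.List.max? (img.keys.map Prod.snd) (fun x => x)).getD 0 = c0 + (W : Int) - 1) :
    (pvRoundA alg enh img).items =
      (PySem.List.pyRange (r0 - 1) (r0 + (H : Int) - 1 + 2) 1).flatMap (fun r =>
        (PySem.List.pyRange (c0 - 1) (c0 + (W : Int) - 1 + 2) 1).map (fun c =>
          ((r, c), PySem.List.pyGetD alg ((PySem.Int.ofCharsBase? (pvOffsA.foldl (fun n dd =>
            n ++ PySem.Int.toChars (img.getD (r + dd.1, c + dd.2) (pvDflt alg enh))) []) 2).getD 0)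
            0))) := by
  simp only [pvRoundA, hminR, hminC, hmaxR, hmaxC]
  rw [show (if PySem.List.pyGetD alg 0 0 = 1 ∧ PySem.Int.mod enh 2 = 1 then (1 : Int) else 0)
      = pvDflt alg enh from rfl]
  rw [pvItems_nested (fun r => r)
    (fun _ => PySem.List.pyRange (c0 - 1) (c0 + (W : Int) - 1 + 2) 1)
    (fun r c => PySem.List.pyGetD alg ((PySem.Int.ofCharsBase? (pvOffsA.foldl (fun n dd =>
      n ++ PySem.Int.toChars (img.getD (r + dd.1, c + dd.2) (pvDflt alg enh))) []) 2).getD 0) 0)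
    (fun _ => PySem.List.nodup_pyRange_one _ _)
    (PySem.List.pyRange (r0 - 1) (r0 + (H : Int) - 1 + 2) 1) PySem.Dict.empty
    (by simpa using PySem.List.nodup_pyRange_one (r0 - 1) (r0 + (H : Int) - 1 + 2))
    (fun r _ c => PySem.Dict.contains_empty _)]
  rfl

-- ===== B-round normalisation =====

theorem pvPadRead (g : List (List Int)) (w : Nat) (bg : Int) (n : Nat) (hn : n < g.length)
    (hlen : (g.getD n []).length = w) (c : Nat) (hc : c < w + 4) :
    PySem.List.pyGetD ([bg, bg] ++ g.getD n [] ++ [bg, bg]) (c : Int) 0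
      = pvRead g (g.length : Int) (w : Int) bg (n : Int) ((c : Int) - 2) := by
  have hl2 : (([bg, bg] : List Int) ++ g.getD n []).length = 2 + w := by
    rw [List.length_append, hlen]; norm_num
  rw [PySem.List.pyGetD_natCast]
  unfold pvRead
  rcases lt_or_ge c 2 with h2 | h2
  · rw [if_neg (by omega)]
    interval_cases c <;> rfl
  · rcases lt_or_ge c (w + 2) with h3 | h3
    · rw [if_pos ⟨by omega, by omega, by omega, by omega⟩]
      rw [PySem.List.pyGetD_natCast g]
      rw [PySem.List.pyGetD_of_nonneg _ 0 (by omega)]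
      rw [show (((c : Int) - 2)).toNat = c - 2 by omega]
      rw [List.getD_append _ _ _ _ (by rw [hl2]; omega)]
      rw [List.getD_append_right _ _ _ _ (by simpa using h2)]
      norm_num
    · rw [if_neg (by omega)]
      rw [List.getD_append_right _ _ _ _ (by rw [hl2]; omega)]
      rw [show c - (([bg, bg] : List Int) ++ g.getD n []).length = c - (2 + w) by rw [hl2]]
      have : c - (2 + w) < 2 := by omega
      interval_cases h : (c - (2 + w)) <;> rfl

theorem pvTripRow_entry (row : List Int) (bg : Int) (w j : Nat) (hj : j < w + 2) :
    (pvTripRow row bg w).getD j 0 =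
      4 * PySem.List.pyGetD ([bg, bg] ++ row ++ [bg, bg]) ((j : Nat) : Int) 0
      + 2 * PySem.List.pyGetD ([bg, bg] ++ row ++ [bg, bg]) (((j + 1 : Nat)) : Int) 0
      + PySem.List.pyGetD ([bg, bg] ++ row ++ [bg, bg]) (((j + 2 : Nat)) : Int) 0 := by
  simp only [pvTripRow]
  rw [List.getD_eq_getElem _ _ (by simpa using hj), List.getElem_map, List.getElem_range]
  push_cast
  ring_nf

theorem pvTripsL_getD (g : List (List Int)) (bg : Int) (w : Nat) (k : Nat)
    (hk : k < g.length + 4) :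
    (pvTripsL g bg w).getD k [] =
      if 2 ≤ k ∧ k < g.length + 2 then pvTripRow (g.getD (k - 2) []) bg w
      else List.replicate (w + 2) (7 * bg) := by
  unfold pvTripsL
  split_ifs with h2
  · rw [List.getD_append _ _ _ _ (by simp; omega)]
    rw [List.getD_append_right _ _ _ _ (by simp; omega)]
    have hlt : k - ([List.replicate (w + 2) (7 * bg), List.replicate (w + 2) (7 * bg)]).length
        = k - 2 := by simp
    rw [hlt]
    rw [List.getD_eq_getElem _ _ (by simp; omega), List.getElem_map,
      ← List.getD_eq_getElem g [] (by omega)]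
  · rcases lt_or_ge k 2 with h3 | h3
    · rw [List.getD_append _ _ _ _ (by simp; omega)]
      rw [List.getD_append _ _ _ _ (by simp; omega)]
      interval_cases k <;> rfl
    · have h4 : g.length + 2 ≤ k := by omega
      rw [List.getD_append_right _ _ _ _ (by simp; omega)]
      have hidx : k - ([List.replicate (w + 2) (7 * bg), List.replicate (w + 2) (7 * bg)]
          ++ g.map (fun row => pvTripRow row bg w)).length = k - (g.length + 2) := by
        simp
      rw [hidx]
      have : k - (g.length + 2) < 2 := by omega
      interval_cases h : (k - (g.length + 2)) <;> rfl

theorem pvTripsL_len (g : List (List Int)) (bg : Int) (w : Nat)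
    (hrect : ∀ row ∈ g, row.length = w) (k : Nat) (hk : k < g.length + 4) :
    ((pvTripsL g bg w).getD k []).length = w + 2 := by
  rw [pvTripsL_getD g bg w k hk]
  split_ifs with h
  · simp [pvTripRow]
  · simp

theorem pvTripsL_entry (g : List (List Int)) (bg : Int) (w : Nat)
    (hrect : ∀ row ∈ g, row.length = w) (k j : Nat)
    (hk : k < g.length + 4) (hj : j < w + 2) :
    ((pvTripsL g bg w).getD k []).getD j 0
      = pvTrip g (g.length : Int) (w : Int) bg ((k : Int) - 2) ((j : Int) - 1) := by
  rw [pvTripsL_getD g bg w k hk]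
  split_ifs with h2
  · have hmem : g.getD (k - 2) [] ∈ g := by
      rw [List.getD_eq_getElem g [] (by omega)]
      exact List.getElem_mem _
    have hrow : (g.getD (k - 2) []).length = w := hrect _ hmem
    rw [pvTripRow_entry _ _ _ _ hj]
    rw [pvPadRead g w bg (k - 2) (by omega) hrow j (by omega),
      pvPadRead g w bg (k - 2) (by omega) hrow (j + 1) (by omega),
      pvPadRead g w bg (k - 2) (by omega) hrow (j + 2) (by omega)]
    simp only [pvTrip]
    rw [show ((k - 2 : Nat) : Int) = (k : Int) - 2 by omega]
    rw [show ((j : Int) - 1) + -1 = (j : Int) - 2 by ring,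
      show ((j : Int) - 1) + 0 = ((j + 1 : Nat) : Int) - 2 by push_cast; ring,
      show ((j : Int) - 1) + 1 = ((j + 2 : Nat) : Int) - 2 by push_cast; ring]
  · rw [List.getD_replicate _ hj]
    have hout : ¬ (2 ≤ k ∧ k < g.length + 2) := h2
    simp only [pvTrip, pvRead]
    rw [if_neg (by omega), if_neg (by omega), if_neg (by omega)]
    ring

theorem pvZip3_map (alg X Y Z : List Int) (n : Nat) (hX : X.length = n) (hY : Y.length = n)
    (hZ : Z.length = n) :
    (X.zip (Y.zip Z)).map (fun p => PySem.List.pyGetD alg (64 * p.1 + 8 * p.2.1 + p.2.2) 0)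
      = (List.range n).map (fun j =>
          PySem.List.pyGetD alg (64 * X.getD j 0 + 8 * Y.getD j 0 + Z.getD j 0) 0) := by
  apply List.ext_getElem
  · simp [hX, hY, hZ]
  · intro i h1 h2
    have hi : i < n := by simpa using h2
    simp only [List.getElem_map, List.getElem_zip, List.getElem_range]
    rw [List.getD_eq_getElem X 0 (by omega), List.getD_eq_getElem Y 0 (by omega),
      List.getD_eq_getElem Z 0 (by omega)]

set_option maxHeartbeats 1000000 in
theorem pvRoundB_norm (alg : List Int) (enh : Int) (g : List (List Int))
    (hrect : ∀ row ∈ g, row.length = (g.getD 0 []).length) :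
    pvRoundB alg enh g =
      (List.range (g.length + 2)).map (fun (i : Nat) =>
        (List.range ((g.getD 0 []).length + 2)).map (fun (j : Nat) =>
          PySem.List.pyGetD alg
            (pvIdxB g (g.length : Int) ((g.getD 0 []).length : Int) (pvDflt alg enh)
              (-1 + (i : Int)) (-1 + (j : Int))) 0)) := by
  simp only [pvRoundB]
  rw [show (if PySem.List.pyGetD alg 0 0 = 1 ∧ PySem.Int.mod enh 2 = 1 then (1 : Int) else 0)
      = pvDflt alg enh from rfl]
  rw [PySem.List.pyGetD_zero]
  set w := (g.getD 0 []).length with hw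
  set bg := pvDflt alg enh with hbg
  apply List.map_congr_left
  intro i hi
  have hi2 : i < g.length + 2 := by simpa using hi
  rw [pvZip3_map alg _ _ _ (w + 2)
    (pvTripsL_len g bg w hrect i (by omega))
    (pvTripsL_len g bg w hrect (i + 1) (by omega))
    (pvTripsL_len g bg w hrect (i + 2) (by omega))]
  apply List.map_congr_left
  intro j hj
  have hj2 : j < w + 2 := by simpa using hj
  rw [pvTripsL_entry g bg w hrect i j (by omega) hj2,
    pvTripsL_entry g bg w hrect (i + 1) j (by omega) hj2,
    pvTripsL_entry g bg w hrect (i + 2) j (by omega) hj2]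
  congr 1
  simp only [pvIdxB]
  rw [show ((-1 + (i : Int)) + -1) = (i : Int) - 2 by ring,
    show ((-1 + (i : Int)) + 0) = ((i + 1 : Nat) : Int) - 2 by push_cast; ring,
    show ((-1 + (i : Int)) + 1) = ((i + 2 : Nat) : Int) - 2 by push_cast; ring,
    show (-1 + (j : Int)) = (j : Int) - 1 by ring]

-- the simulation invariant: A's dict is the row-major image of B's rectangular grid at (r0, c0)
def pvInv (img : PySem.Dict (Int × Int) Int) (g : List (List Int)) (r0 c0 : Int) : Prop :=
  1 ≤ g.length ∧ 1 ≤ (g.getD 0 []).length ∧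
  (∀ row ∈ g, row.length = (g.getD 0 []).length) ∧
  (∀ row ∈ g, ∀ v ∈ row, v = 0 ∨ v = 1) ∧
  (PySem.List.min? (img.keys.map Prod.fst) (fun x => x)).getD 0 = r0 ∧
  (PySem.List.min? (img.keys.map Prod.snd) (fun x => x)).getD 0 = c0 ∧
  (PySem.List.max? (img.keys.map Prod.fst) (fun x => x)).getD 0 = r0 + g.length - 1 ∧
  (PySem.List.max? (img.keys.map Prod.snd) (fun x => x)).getD 0
      = c0 + (g.getD 0 []).length - 1 ∧
  (∀ R C d0 : Int, img.getD (R, C) d0 =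
    if 0 ≤ R - r0 ∧ R - r0 < (g.length : Int) ∧ 0 ≤ C - c0 ∧
        C - c0 < ((g.getD 0 []).length : Int)
    then PySem.List.pyGetD (PySem.List.pyGetD g (R - r0) []) (C - c0) 0 else d0) ∧
  ((img.values.count 1 : Nat) : Int) = (g.map List.sum).sum

set_option maxHeartbeats 2000000 in
theorem pvRound_inv (alg : List Int) (halg : ∀ v ∈ alg, v = 0 ∨ v = 1) (enh : Int)
    (img : PySem.Dict (Int × Int) Int) (g : List (List Int)) (r0 c0 : Int)
    (hH : 1 ≤ g.length) (hW : 1 ≤ (g.getD 0 []).length)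
    (hrect : ∀ row ∈ g, row.length = (g.getD 0 []).length)
    (hcells : ∀ row ∈ g, ∀ v ∈ row, v = 0 ∨ v = 1)
    (hminR : (PySem.List.min? (img.keys.map Prod.fst) (fun x => x)).getD 0 = r0)
    (hminC : (PySem.List.min? (img.keys.map Prod.snd) (fun x => x)).getD 0 = c0)
    (hmaxR : (PySem.List.max? (img.keys.map Prod.fst) (fun x => x)).getD 0
      = r0 + g.length - 1)
    (hmaxC : (PySem.List.max? (img.keys.map Prod.snd) (fun x => x)).getD 0
      = c0 + (g.getD 0 []).length - 1)
    (hget : ∀ R C : Int, img.getD (R, C) (pvDflt alg enh) =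
      if 0 ≤ R - r0 ∧ R - r0 < (g.length : Int) ∧ 0 ≤ C - c0 ∧
          C - c0 < ((g.getD 0 []).length : Int)
      then PySem.List.pyGetD (PySem.List.pyGetD g (R - r0) []) (C - c0) 0
      else pvDflt alg enh) :
    pvInv (pvRoundA alg enh img) (pvRoundB alg enh g) (r0 - 1) (c0 - 1) := by
  set H := g.length with hHdef
  set W := (g.getD 0 []).length with hWdef
  set NG := pvRoundB alg enh g with hNGdef
  have hnorm : NG = (List.range (H + 2)).map (fun (i : Nat) =>
      (List.range (W + 2)).map (fun (j : Nat) =>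
        PySem.List.pyGetD alg
          (pvIdxB g (H : Int) (W : Int) (pvDflt alg enh) (-1 + (i : Int)) (-1 + (j : Int))) 0)) :=
    pvRoundB_norm alg enh g hrect
  have hNGlen : NG.length = H + 2 := by rw [hnorm]; simp
  have hNGrow : ∀ i : Nat, i < H + 2 → NG.getD i [] =
      (List.range (W + 2)).map (fun (j : Nat) =>
        PySem.List.pyGetD alg
          (pvIdxB g (H : Int) (W : Int) (pvDflt alg enh) (-1 + (i : Int)) (-1 + (j : Int))) 0) := by
    intro i hi
    rw [hnorm, List.getD_eq_getElem _ _ (by simpa using hi), List.getElem_map]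
    simp
  have hNGrowlen : ∀ i : Nat, i < H + 2 → (NG.getD i []).length = W + 2 := by
    intro i hi; rw [hNGrow i hi]; simp
  have hNG0 : (NG.getD 0 []).length = W + 2 := hNGrowlen 0 (by omega)
  have hitems : (pvRoundA alg enh img).items = pvRM (r0 - 1) (c0 - 1) NG := by
    rw [pvRoundA_items alg enh img r0 c0 H W hminR hminC hmaxR hmaxC]
    rw [pvRM, hNGlen]
    rw [PySem.List.pyRange_one (r0 - 1) (r0 + (H : Int) - 1 + 2)]
    rw [show ((r0 + (H : Int) - 1 + 2) - (r0 - 1)).toNat = H + 2 by omega]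
    rw [List.flatMap_map]
    rw [List.flatMap_def, List.flatMap_def]
    apply congrArg
    apply List.map_congr_left
    intro k hk
    have hk2 : k < H + 2 := by simpa using hk
    rw [PySem.List.pyRange_one (c0 - 1) (c0 + (W : Int) - 1 + 2)]
    rw [show ((c0 + (W : Int) - 1 + 2) - (c0 - 1)).toNat = W + 2 by omega]
    rw [List.map_map, hNGrowlen k hk2]
    apply List.map_congr_left
    intro j hj
    have hj2 : j < W + 2 := by simpa using hj
    simp only [Function.comp]
    have hcell := pvCell_eq alg img g r0 c0 (pvDflt alg enh) hget hcells (pvDflt01 alg enh)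
      ((r0 - 1) + (k : Int)) ((c0 - 1) + (j : Int))
    rw [show ((r0 - 1) + (k : Int)) - r0 = -1 + (k : Int) by ring,
      show ((c0 - 1) + (j : Int)) - c0 = -1 + (j : Int) by ring] at hcell
    refine Prod.ext rfl ?_
    rw [hNGrow k hk2, List.getD_eq_getElem _ _ (by simpa using hj2), List.getElem_map]
    simp only [List.getElem_range]
    exact hcell
  have hb := pvRect_bounds (r0 - 1) (c0 - 1) NG (W + 2) (by omega) (by omega)
    (fun i hi => hNGrowlen i (by rwa [hNGlen] at hi))
  have hkeys : (pvRoundA alg enh img).keys = (pvRM (r0 - 1) (c0 - 1) NG).map (fun p => p.1) := by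
    rw [PySem.Dict.keys, hitems]
  refine ⟨by omega, by omega, ?_, ?_, ?_, ?_, ?_, ?_, ?_, ?_⟩
  · intro row hrow
    rcases List.mem_iff_getElem.mp hrow with ⟨i, hi, rfl⟩
    rw [← List.getD_eq_getElem NG [] hi, hNG0, hNGrowlen i (by omega)]
  · intro row hrow v hv
    rcases List.mem_iff_getElem.mp hrow with ⟨i, hi, rfl⟩
    rw [← List.getD_eq_getElem NG [] hi, hNGrow i (by omega)] at hv
    rcases List.mem_map.mp hv with ⟨j, _, rfl⟩
    exact pvAlgRead01 alg halg _
  · rw [hkeys]; exact hb.1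
  · rw [hkeys]; exact hb.2.1
  · have hb3 := hb.2.2.1
    rw [hNGlen] at hb3
    rw [hkeys, hNGlen]; exact hb3
  · rw [hkeys, hNG0]; exact hb.2.2.2
  · intro R C d0
    rw [pvRM_getD NG (r0 - 1) (c0 - 1) _ hitems R C d0, hNGlen]
    by_cases hrow : 0 ≤ R - (r0 - 1) ∧ R - (r0 - 1) < ((H + 2 : Nat) : Int)
    · have hrl : (NG.getD (R - (r0 - 1)).toNat []).length = W + 2 := hNGrowlen _ (by omega)
      rw [hrl, hNG0]
      by_cases hcol : 0 ≤ C - (c0 - 1) ∧ C - (c0 - 1) < ((W + 2 : Nat) : Int)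
      · rw [if_pos (by omega), if_pos (by omega)]
        rw [PySem.List.pyGetD_of_nonneg NG [] (by omega),
          PySem.List.pyGetD_of_nonneg _ 0 (by omega)]
      · rw [if_neg (by omega), if_neg (by omega)]
    · rw [hNG0]
      rw [if_neg (by omega), if_neg (by omega)]
  · rw [PySem.Dict.values, hitems, pvRM_values]
    have h01 : ∀ v ∈ NG.flatten, v = 0 ∨ v = 1 := by
      intro v hv
      rcases List.mem_flatten.mp hv with ⟨row, hrow, hvr⟩
      rcases List.mem_iff_getElem.mp hrow with ⟨i, hi, rfl⟩
      rw [← List.getD_eq_getElem NG [] hi, hNGrow i (by omega)] at hvr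
      rcases List.mem_map.mp hvr with ⟨j, _, rfl⟩
      exact pvAlgRead01 alg halg _
    rw [pvCount_one_eq_sum _ h01, List.sum_flatten]

theorem pvFold_inv (alg : List Int) (halg : ∀ v ∈ alg, v = 0 ∨ v = 1) (l : List Int) :
    ∀ (img : PySem.Dict (Int × Int) Int) (g : List (List Int)) (r0 c0 : Int),
      pvInv img g r0 c0 →
      ∃ r1 c1, pvInv (l.foldl (fun im e => pvRoundA alg e im) img)
        (l.foldl (fun gg e => pvRoundB alg e gg) g) r1 c1 := by
  induction l with
  | nil => intro img g r0 c0 h; exact ⟨r0, c0, h⟩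
  | cons e rest ih =>
    intro img g r0 c0 hInv
    obtain ⟨h1, h2, h3, h4, h5, h6, h7, h8, h9, h10⟩ := hInv
    simp only [List.foldl_cons]
    exact ih (pvRoundA alg e img) (pvRoundB alg e g) (r0 - 1) (c0 - 1)
      (pvRound_inv alg halg e img g r0 c0 h1 h2 h3 h4 h5 h6 h7 h8 (fun R C => h9 R C _))

-- B's helpers, named for the proofs
def pvRows (values : List String) : List (List Int) :=
  (values.drop 2).map (fun s => s.toList.map pvCellB)

-- the image dict parseInput builds is the row-major image of the raw (ragged) rows at (0, 0)
theorem pvImgA_items (values : List String) :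
    (pvImgA values).items = pvRM 0 0 (pvRows values) := by
  rw [pvImgA]
  rw [pvItems_nested (fun r => r - 2)
    (fun r => PySem.List.pyRange 0 (PySem.Str.len (PySem.List.pyGetD values r "")) 1)
    (fun r c => pvCellA (PySem.List.pyGetD (PySem.List.pyGetD values r "").toList c ' '))
    (fun _ => PySem.List.nodup_pyRange_one _ _)
    (PySem.List.pyRange 2 (PySem.List.len values) 1) PySem.Dict.empty
    ((PySem.List.nodup_pyRange_one _ _).map (fun hab => by omega))
    (fun r _ c => PySem.Dict.contains_empty _)]
  rw [show (PySem.Dict.empty : PySem.Dict (Int × Int) Int).items = [] from rfl, List.nil_append]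
  rw [PySem.List.len_eq]
  rw [PySem.List.pyRange_one 2 (values.length : Int), List.flatMap_map]
  rw [show ((values.length : Int) - 2).toNat = values.length - 2 by omega]
  rw [pvRM]
  rw [show (pvRows values).length = values.length - 2 by simp [pvRows]]
  rw [List.flatMap_def, List.flatMap_def]
  apply congrArg
  apply List.map_congr_left
  intro k hk
  have hk2 : k < values.length - 2 := by simpa using hk
  have hvr : PySem.List.pyGetD values (2 + (k : Int)) "" = values.getD (2 + k) "" := by
    rw [PySem.List.pyGetD_of_nonneg values "" (by omega)]
    have : ((2 : Int) + (k : Int)).toNat = 2 + k := by omega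
    rw [this]
  have hrow : (pvRows values).getD k [] = (values.getD (2 + k) "").toList.map pvCellB := by
    rw [pvRows]
    rw [List.getD_eq_getElem _ _ (by simp; omega), List.getElem_map, List.getElem_drop]
    rw [← List.getD_eq_getElem values "" (by omega)]
  rw [hvr, PySem.Str.len_eq, hrow]
  rw [show ((values.getD (2 + k) "").toList.map pvCellB).length
      = (values.getD (2 + k) "").toList.length from by simp]
  rw [PySem.List.pyRange_zero_nat]
  rw [List.map_map]
  apply List.map_congr_left
  intro j hj
  have hj2 : j < (values.getD (2 + k) "").toList.length := by simpa using hj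
  simp only [Function.comp]
  refine Prod.ext (Prod.ext ?_ ?_) ?_
  · show ((2 : Int) + (k : Int)) - 2 = 0 + (k : Int)
    ring
  · show ((j : Int)) = 0 + (j : Int)
    ring
  · show pvCellA (PySem.List.pyGetD (values.getD (2 + k) "").toList ((j : Nat) : Int) ' ')
      = ((values.getD (2 + k) "").toList.map pvCellB).getD j 0
    rw [PySem.List.pyGetD_natCast]
    have h2' : j < ((values.getD (2 + k) "").toList.map pvCellB).length := by simpa using hj2
    rw [List.getD_eq_getElem ((values.getD (2 + k) "").toList.map pvCellB) 0 h2',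
      List.getElem_map, List.getD_eq_getElem _ _ hj2]
    rfl

theorem pvTrimB_decomp (rows : List (List Int)) :
    ∃ E1 E2 : List (List Int), rows = E1 ++ pvTrimB rows ++ E2 ∧
      (∀ r ∈ E1, r = []) ∧ (∀ r ∈ E2, r = []) ∧
      (∀ h : pvTrimB rows ≠ [],
        (pvTrimB rows).head h ≠ [] ∧ (pvTrimB rows).getLast h ≠ []) := by
  refine ⟨rows.takeWhile List.isEmpty,
    ((rows.dropWhile List.isEmpty).reverse.takeWhile List.isEmpty).reverse, ?_, ?_, ?_, ?_⟩
  · conv_lhs => rw [← List.takeWhile_append_dropWhile (p := List.isEmpty) (l := rows)]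
    rw [List.append_assoc]
    congr 1
    conv_lhs => rw [← List.reverse_reverse (rows.dropWhile List.isEmpty),
      ← List.takeWhile_append_dropWhile (p := List.isEmpty)
        (l := (rows.dropWhile List.isEmpty).reverse)]
    rw [List.reverse_append]
    rfl
  · intro r hr
    exact List.isEmpty_iff.mp (List.mem_takeWhile_imp hr)
  · intro r hr
    rw [List.mem_reverse] at hr
    exact List.isEmpty_iff.mp (List.mem_takeWhile_imp hr)
  · intro h
    constructor
    · have hmid : rows.dropWhile List.isEmpty ≠ [] := by
        intro hc
        apply h
        unfold pvTrimB
        rw [hc]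
        rfl
      have hsp : rows.dropWhile List.isEmpty
          = pvTrimB rows ++ ((rows.dropWhile List.isEmpty).reverse.takeWhile List.isEmpty).reverse := by
        conv_lhs => rw [← List.reverse_reverse (rows.dropWhile List.isEmpty),
          ← List.takeWhile_append_dropWhile (p := List.isEmpty)
            (l := (rows.dropWhile List.isEmpty).reverse)]
        rw [List.reverse_append]
        rfl
      have e1 : ((pvTrimB rows) ++
          ((rows.dropWhile List.isEmpty).reverse.takeWhile List.isEmpty).reverse).head?
          = some ((pvTrimB rows).head h) := by
        rw [List.head?_append, List.head?_eq_some_head h]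
        rfl
      rw [← hsp, List.head?_eq_some_head hmid] at e1
      have e3 : (rows.dropWhile List.isEmpty).head hmid = (pvTrimB rows).head h :=
        Option.some.inj e1
      rw [← e3]
      intro hc
      have := List.head_dropWhile_not List.isEmpty hmid
      rw [hc] at this
      simp at this
    · have hD : (rows.dropWhile List.isEmpty).reverse.dropWhile List.isEmpty ≠ [] := by
        intro hc
        apply h
        unfold pvTrimB
        rw [hc]
        rfl
      have hg : (pvTrimB rows).getLast h
          = ((rows.dropWhile List.isEmpty).reverse.dropWhile List.isEmpty).head hD := by
        unfold pvTrimB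
        exact List.getLast_reverse _
      rw [hg]
      intro hc
      have := List.head_dropWhile_not List.isEmpty hD
      rw [hc] at this
      simp at this

def pvT (values : List String) : List (List Int) := pvTrimB (pvRows values)
def pvWidthI (values : List String) : Int :=
  PySem.List.maxD ((pvT values).map (fun r => PySem.List.len r)) (fun x => x) 0
def pvGrid0 (values : List String) : List (List Int) :=
  (pvT values).map (fun r => r ++ List.replicate ((pvWidthI values - PySem.List.len r).toNat) 0)

theorem pvCellB01 (ch : Char) : pvCellB ch = 0 ∨ pvCellB ch = 1 := by
  unfold pvCellB; split_ifs <;> simp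

theorem pvRows_cells01 (values : List String) :
    ∀ row ∈ pvRows values, ∀ v ∈ row, v = 0 ∨ v = 1 := by
  intro row hrow v hv
  rw [pvRows] at hrow
  rcases List.mem_map.mp hrow with ⟨s, _, rfl⟩
  rcases List.mem_map.mp hv with ⟨ch, _, rfl⟩
  exact pvCellB01 ch

theorem pvAlg01 (values : List String) : ∀ v ∈ pvAlgA values, v = 0 ∨ v = 1 := by
  intro v hv
  rcases List.mem_map.mp hv with ⟨ch, _, rfl⟩
  unfold pvCellA; split_ifs <;> simp

theorem pvDflt_zero (alg : List Int) : pvDflt alg 0 = 0 := by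
  have h2 : PySem.Int.mod 0 2 = 0 := by decide
  unfold pvDflt
  rw [h2]
  simp

theorem pvBase_count (values : List String) :
    (((pvImgA values).values.count 1 : Nat) : Int) = ((pvGrid0 values).map List.sum).sum := by
  rw [PySem.Dict.values, show (fun x : (Int × Int) × Int => x.2) = Prod.snd from rfl]
  rw [show List.map Prod.snd (pvImgA values).items
      = (pvImgA values).items.map (fun p => p.2) from rfl]
  rw [pvImgA_items, pvRM_values]
  rw [pvCount_one_eq_sum _ (by
    intro v hv
    rcases List.mem_flatten.mp hv with ⟨row, hrow, hvr⟩
    exact pvRows_cells01 values row hrow v hvr)]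
  rw [List.sum_flatten]
  obtain ⟨E1, E2, hsplit, hE1, hE2, _⟩ := pvTrimB_decomp (pvRows values)
  conv_lhs => rw [hsplit]
  rw [List.map_append, List.map_append, List.sum_append, List.sum_append]
  have hz1 : (E1.map List.sum).sum = 0 := by
    rw [List.sum_eq_zero]
    intro x hx
    rcases List.mem_map.mp hx with ⟨row, hrow, rfl⟩
    rw [hE1 row hrow]
    rfl
  have hz2 : (E2.map List.sum).sum = 0 := by
    rw [List.sum_eq_zero]
    intro x hx
    rcases List.mem_map.mp hx with ⟨row, hrow, rfl⟩
    rw [hE2 row hrow]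
    rfl
  rw [hz1, hz2]
  rw [show (pvTrimB (pvRows values)) = pvT values from rfl]
  rw [pvGrid0, List.map_map]
  have : ∀ r ∈ pvT values, (List.sum ∘ fun r =>
      r ++ List.replicate ((pvWidthI values - PySem.List.len r).toNat) 0) r = List.sum r := by
    intro r _
    simp [Function.comp, List.sum_append, List.sum_replicate]
  rw [List.map_congr_left this]
  ring

set_option maxHeartbeats 2000000 in
theorem pvBase_inv (values : List String) (hne : pvT values ≠ []) :
    ∃ r1 c1, pvInv (pvRoundA (pvAlgA values) 0 (pvImgA values))
      (pvRoundB (pvAlgA values) 0 (pvGrid0 values)) r1 c1 := by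
  obtain ⟨E1, E2, hsplit, hE1, hE2, hEnds⟩ := pvTrimB_decomp (pvRows values)
  have hneT : pvTrimB (pvRows values) ≠ [] := hne
  obtain ⟨hhead, hlast⟩ := hEnds hneT
  set rows := pvRows values with hrowsdef
  set T : List (List Int) := pvTrimB rows with hTdef
  set t : Nat := E1.length with htdef
  set H : Nat := T.length with hHdef
  have hH1 : 1 ≤ H := List.length_pos_of_ne_nil hneT
  cases hmax : PySem.List.max? (T.map (fun r => PySem.List.len r)) (fun x => x) with
  | none =>
    exfalso
    rw [PySem.List.max?_eq_none_iff] at hmax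
    exact hneT (by simpa using hmax)
  | some M =>
  have hWdef : pvWidthI values = M := by
    rw [pvWidthI, PySem.List.maxD]
    rw [show ((pvT values).map (fun r => PySem.List.len r))
        = T.map (fun r => PySem.List.len r) from rfl]
    rw [hmax]
    rfl
  have hTmem : ∀ i : Nat, i < H → T.getD i [] ∈ T := by
    intro i hi
    rw [List.getD_eq_getElem _ _ hi]
    exact List.getElem_mem _
  have hMub : ∀ row ∈ T, (row.length : Int) ≤ M := by
    intro row hrow
    have := PySem.List.max?_isMax hmax (PySem.List.len row) (List.mem_map_of_mem hrow)
    simpa [PySem.List.len_eq] using this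
  have hMmem : ∃ row ∈ T, (row.length : Int) = M := by
    rcases List.mem_map.mp (PySem.List.max?_mem hmax) with ⟨row, hrow, hlen⟩
    exact ⟨row, hrow, by rw [← hlen, PySem.List.len_eq]⟩
  have hheadpos : 0 < (T.head hneT).length := List.length_pos_of_ne_nil hhead
  have hM1 : (1 : Int) ≤ M := by
    have h1 := hMub (T.head hneT) (List.head_mem hneT)
    omega
  set G := pvGrid0 values with hGdef
  have hGN : G = T.map (fun r => r ++ List.replicate ((M - (r.length : Int)).toNat) 0) := by
    rw [hGdef, pvGrid0, hWdef]
    rw [show (pvT values) = T from rfl]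
    apply List.map_congr_left
    intro r _
    rw [PySem.List.len_eq]
  have hGlen : G.length = H := by rw [hGN, List.length_map]
  have hGrow : ∀ i : Nat, i < H → G.getD i []
      = T.getD i [] ++ List.replicate ((M - ((T.getD i []).length : Int)).toNat) 0 := by
    intro i hi
    rw [hGN, List.getD_eq_getElem _ _ (by simpa using hi), List.getElem_map,
      ← List.getD_eq_getElem T [] hi]
  have hGrowlen : ∀ i : Nat, i < H → ((G.getD i []).length : Int) = M := by
    intro i hi
    have hle := hMub (T.getD i []) (hTmem i hi)
    rw [hGrow i hi, List.length_append, List.length_replicate]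
    omega
  have hG0 : ((G.getD 0 []).length : Int) = M := hGrowlen 0 (by omega)
  have hGrect : ∀ row ∈ G, row.length = (G.getD 0 []).length := by
    intro row hrow
    rcases List.mem_iff_getElem.mp hrow with ⟨i, hi, rfl⟩
    have h1 := hGrowlen i (by rwa [hGlen] at hi)
    rw [← List.getD_eq_getElem G [] hi]
    omega
  have hlenrows : rows.length = t + H + E2.length := by
    rw [hsplit]
    simp [List.length_append]
    omega
  have hrow_lt : ∀ i : Nat, i < t → rows.getD i [] = [] := by
    intro i hi
    rw [hsplit, List.getD_append _ _ _ i (by simp [List.length_append]; omega),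
      List.getD_append _ _ _ i (by omega)]
    apply hE1
    rw [List.getD_eq_getElem _ _ hi]
    exact List.getElem_mem _
  have hrow_mid : ∀ i : Nat, i < H → rows.getD (t + i) [] = T.getD i [] := by
    intro i hi
    rw [hsplit, List.getD_append _ _ _ _ (by simp [List.length_append]; omega),
      List.getD_append_right E1 T _ _ (by omega)]
    congr 1
    omega
  have hrow_hi : ∀ i : Nat, t + H ≤ i → rows.getD i [] = [] := by
    intro i hi
    rcases lt_or_ge i rows.length with h | h
    · rw [hsplit, List.getD_append_right (E1 ++ T) E2 _ _ (by simp [List.length_append]; omega)]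
      apply hE2
      have hlt : i - (E1 ++ T).length < E2.length := by
        simp [List.length_append]
        omega
      rw [List.getD_eq_getElem _ _ hlt]
      exact List.getElem_mem _
    · exact List.getD_eq_default _ _ h
  have hkeys : (pvImgA values).keys = (pvRM 0 0 rows).map (fun p => p.1) := by
    rw [PySem.Dict.keys, pvImgA_items]
  have hrowt : rows.getD t [] = T.head hneT := by
    have h0 := hrow_mid 0 (by omega)
    rw [show t + 0 = t from rfl] at h0
    rw [h0, List.getD_eq_getElem T [] (by omega), ← List.head_eq_getElem]
  have b1 : (PySem.List.min? ((pvImgA values).keys.map Prod.fst) (fun x => x)).getD 0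
      = (t : Int) := by
    rw [hkeys]
    refine pvMin_getD_eq ((pvRM_mem_fst 0 0 rows (t : Int)).mpr
      ⟨t, by omega, by rw [hrowt]; omega, by omega⟩) ?_
    intro x hx
    rcases (pvRM_mem_fst 0 0 rows x).mp hx with ⟨i, hi, hpos, rfl⟩
    rcases lt_or_ge i t with h | h
    · rw [hrow_lt i h] at hpos; simp at hpos
    · omega
  have b2 : (PySem.List.min? ((pvImgA values).keys.map Prod.snd) (fun x => x)).getD 0
      = (0 : Int) := by
    rw [hkeys]
    refine pvMin_getD_eq ((pvRM_mem_snd 0 0 rows 0).mpr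
      ⟨t, 0, by omega, by rw [hrowt]; omega, by omega⟩) ?_
    intro x hx
    rcases (pvRM_mem_snd 0 0 rows x).mp hx with ⟨i, j, hi, hj, rfl⟩
    omega
  have hrowlast : rows.getD (t + (H - 1)) [] = T.getLast hneT := by
    rw [hrow_mid (H - 1) (by omega), List.getD_eq_getElem _ _ (by omega),
      ← List.getLast_eq_getElem]
  have b3 : (PySem.List.max? ((pvImgA values).keys.map Prod.fst) (fun x => x)).getD 0
      = (t : Int) + (H : Int) - 1 := by
    rw [hkeys]
    refine pvMax_getD_eq ((pvRM_mem_fst 0 0 rows ((t : Int) + (H : Int) - 1)).mpr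
      ⟨t + (H - 1), by omega, by rw [hrowlast]; exact List.length_pos_of_ne_nil hlast, by push_cast; omega⟩) ?_
    intro x hx
    rcases (pvRM_mem_fst 0 0 rows x).mp hx with ⟨i, hi, hpos, rfl⟩
    rcases lt_or_ge i (t + H) with h | h
    · omega
    · rw [hrow_hi i h] at hpos; simp at hpos
  have b4 : (PySem.List.max? ((pvImgA values).keys.map Prod.snd) (fun x => x)).getD 0
      = M - 1 := by
    rw [hkeys]
    obtain ⟨rowM, hrowM, hlenM⟩ := hMmem
    rcases List.mem_iff_getElem.mp hrowM with ⟨iT, hiT, hEl⟩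
    have hgetT : T.getD iT [] = rowM := by rw [List.getD_eq_getElem _ _ hiT]; exact hEl
    refine pvMax_getD_eq ((pvRM_mem_snd 0 0 rows (M - 1)).mpr
      ⟨t + iT, M.toNat - 1, by omega, ?_, by omega⟩) ?_
    · rw [hrow_mid iT hiT, hgetT]
      omega
    · intro x hx
      rcases (pvRM_mem_snd 0 0 rows x).mp hx with ⟨i, j, hi, hj, rfl⟩
      have hipos : 0 < (rows.getD i []).length := by omega
      have h5 : ¬ (i < t) := fun hlt => by rw [hrow_lt _ hlt] at hipos; simp at hipos
      have h6 : ¬ (t + H ≤ i) := fun hge => by rw [hrow_hi _ hge] at hipos; simp at hipos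
      have hrowi : rows.getD i [] = T.getD (i - t) [] := by
        have := hrow_mid (i - t) (by omega)
        rw [show t + (i - t) = i by omega] at this
        exact this
      have hle := hMub (T.getD (i - t) []) (hTmem (i - t) (by omega))
      rw [hrowi] at hj
      omega
  have hcellsG : ∀ row ∈ G, ∀ v ∈ row, v = 0 ∨ v = 1 := by
    intro row hrow v hv
    rw [hGN] at hrow
    rcases List.mem_map.mp hrow with ⟨r, hr, rfl⟩
    rcases List.mem_append.mp hv with h | h
    · refine pvRows_cells01 values r ?_ v h
      have hmem : r ∈ rows := by
        rw [hsplit]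
        exact List.mem_append.mpr (Or.inl (List.mem_append.mpr (Or.inr hr)))
      exact hmem
    · left
      exact (List.eq_of_mem_replicate h)
  have hget' : ∀ R C : Int, (pvImgA values).getD (R, C) (pvDflt (pvAlgA values) 0) =
      if 0 ≤ R - (t : Int) ∧ R - (t : Int) < (G.length : Int) ∧ 0 ≤ C - 0 ∧
          C - 0 < ((G.getD 0 []).length : Int)
      then PySem.List.pyGetD (PySem.List.pyGetD G (R - (t : Int)) []) (C - 0) 0
      else pvDflt (pvAlgA values) 0 := by
    intro R C
    rw [pvDflt_zero]
    rw [pvRM_getD rows 0 0 _ (pvImgA_items values) R C 0]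
    have hGlenI : (G.length : Int) = (H : Int) := by rw [hGlen]
    by_cases hR : 0 ≤ R - (t : Int) ∧ R - (t : Int) < (H : Int)
    · have hiT : (R - (t : Int)).toNat < H := by omega
      have hrowEq : rows.getD (R - 0).toNat [] = T.getD (R - (t : Int)).toNat [] := by
        rw [show (R - 0).toNat = t + (R - (t : Int)).toNat by omega]
        exact hrow_mid _ hiT
      have hpadded : PySem.List.pyGetD G (R - (t : Int)) []
          = T.getD (R - (t : Int)).toNat []
            ++ List.replicate ((M - ((T.getD (R - (t : Int)).toNat []).length : Int)).toNat) 0 := by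
        rw [PySem.List.pyGetD_of_nonneg G [] (by omega)]
        exact hGrow _ hiT
      have hTle : ((T.getD (R - (t : Int)).toNat []).length : Int) ≤ M :=
        hMub _ (hTmem _ hiT)
      have hrl : ((rows.getD (R - 0).toNat []).length : Int)
          = ((T.getD (R - (t : Int)).toNat []).length : Int) := by rw [hrowEq]
      by_cases hC : 0 ≤ C ∧ C < M
      · by_cases hCrow : C < ((T.getD (R - (t : Int)).toNat []).length : Int)
        · rw [if_pos (by refine ⟨by omega, by omega, by omega, by omega⟩),
            if_pos (by refine ⟨by omega, by omega, by omega, by omega⟩)]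
          rw [hpadded, PySem.List.pyGetD_of_nonneg _ 0 (by omega),
            List.getD_append _ _ _ _ (by omega), hrowEq]
        · rw [if_neg (by omega),
            if_pos (by refine ⟨by omega, by omega, by omega, by omega⟩)]
          rw [hpadded, PySem.List.pyGetD_of_nonneg _ 0 (by omega),
            List.getD_append_right _ _ _ _ (by omega), pvGetD_replicate0]
      · rw [if_neg (by omega), if_neg (by omega)]
    · rw [if_neg ?lhs, if_neg (by omega)]
      case lhs =>
        rintro ⟨h1, h2, h3, h4⟩
        have hipos : 0 < ((rows.getD (R - 0).toNat []).length : Int) := by omega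
        have h5 : ¬ ((R - 0).toNat < t) := fun hlt => by
          rw [hrow_lt _ hlt] at hipos; simp at hipos
        have h6 : ¬ (t + H ≤ (R - 0).toNat) := fun hge => by
          rw [hrow_hi _ hge] at hipos; simp at hipos
        omega
  refine ⟨(t : Int) - 1, 0 - 1, ?_⟩
  exact pvRound_inv (pvAlgA values) (pvAlg01 values) 0 (pvImgA values) G (t : Int) 0
    (by omega) (by omega) hGrect hcellsG b1 b2 (by rw [hGlen]; exact b3)
    (by rw [hG0, b4]; ring) hget'

-- ===== VERDICT (by name: the statement is the Claim_ definition above) =====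
theorem part1_spec : Claim_equal_part1 := by
  unfold Claim_equal_part1
  intro values rounds _hdom hpre
  unfold Spec_part1
  have hcell : pvCellB = pvCellA := rfl
  have hslice : PySem.List.slice values (some 2) none = values.drop 2 := by
    rw [PySem.List.slice_from values (by norm_num : (0 : Int) ≤ 2)]
    rfl
  have hA : part1 values rounds =
      ((((PySem.List.pyRange 0 rounds 1).foldl (fun im e => pvRoundA (pvAlgA values) e im)
        (pvImgA values)).values.count 1 : Nat) : Int) := by
    simp only [part1]
  have hB : part1_alt values rounds =
      (((PySem.List.pyRange 0 rounds 1).foldl (fun g e => pvRoundB (pvAlgA values) e g)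
        (pvGrid0 values)).map List.sum).sum := by
    simp only [part1_alt, hslice, hcell]
    rfl
  rw [hA, hB]
  rcases hpre with ⟨_hvne, hcase⟩
  by_cases hr : rounds ≤ 0
  · rw [PySem.List.pyRange_one_eq_nil (by omega)]
    simp only [List.foldl_nil]
    exact pvBase_count values
  · have hex : ∃ row ∈ pvRows values, row ≠ [] := by
      rcases hcase with h | ⟨⟨s, hs, hsne⟩, _⟩
      · omega
      · refine ⟨s.toList.map pvCellB, by rw [pvRows]; exact List.mem_map_of_mem hs, ?_⟩
        intro hnil
        rcases List.map_eq_nil_iff.mp hnil with hnil2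
        exact hsne (by rwa [String.toList_eq_nil_iff] at hnil2)
    have hne : pvT values ≠ [] := by
      obtain ⟨E1, E2, hsplit, hE1, hE2, _⟩ := pvTrimB_decomp (pvRows values)
      intro hTnil
      have hTnil' : pvTrimB (pvRows values) = [] := hTnil
      obtain ⟨row, hrow, hrne⟩ := hex
      rw [hsplit, hTnil'] at hrow
      rcases List.mem_append.mp hrow with h | h
      · rcases List.mem_append.mp h with h | h
        · exact hrne (hE1 _ h)
        · cases h
      · exact hrne (hE2 _ h)
    obtain ⟨r1, c1, hInv⟩ := pvBase_inv values hne
    rw [PySem.List.pyRange_one_cons (by omega : (0 : Int) < rounds)]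
    simp only [List.foldl_cons]
    obtain ⟨r2, c2, hFin⟩ := pvFold_inv (pvAlgA values) (pvAlg01 values)
      (PySem.List.pyRange 1 rounds 1) _ _ r1 c1 hInv
    exact hFin.2.2.2.2.2.2.2.2.2
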